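-- pv_equiv track=rewrite | github.com/daniel692a/competitive-programming | contest/flower.py | final_size
-- ===== SOURCE A (Python) =====
-- from typing import List
--
-- def final_size(days: List[int])->int:
--     flower_size = 1
--     for i in range(len(days)):
--         if (i<=len(days)-2) and (days[i]==0) and (days[i+1]==0):
--             return -1
--         elif (i>=2) and (days[i]==1) and (days[i-1]==1):
--             flower_size += 5
--         elif days[i] == 1:
--             flower_size += 1
--     return flower_size
-- ===== SOURCE B (Python) =====
-- from typing import List
--
-- def final_size(days: List[int]) -> int:
--     n = len(days)
--     if any(days[i] == 0 and days[i+1] == 0 for i in range(n - 1)):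
--         return -1
--     ones = sum(1 for d in days if d == 1)
--     pairs = sum(1 for i in range(2, n) if days[i] == 1 and days[i-1] == 1)
--     return 1 + ones + 4 * pairs
-- ===== Notes on version B (the rewrite author's own statement) =====
-- stated objective: simpler
-- what changed: Replaces A's single fused branch-accumulator loop (with early return) by a guard pass for adjacent zero pairs plus two independent closed-form counts combined as 1 + ones + 4*pairs.
import Mathlib
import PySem

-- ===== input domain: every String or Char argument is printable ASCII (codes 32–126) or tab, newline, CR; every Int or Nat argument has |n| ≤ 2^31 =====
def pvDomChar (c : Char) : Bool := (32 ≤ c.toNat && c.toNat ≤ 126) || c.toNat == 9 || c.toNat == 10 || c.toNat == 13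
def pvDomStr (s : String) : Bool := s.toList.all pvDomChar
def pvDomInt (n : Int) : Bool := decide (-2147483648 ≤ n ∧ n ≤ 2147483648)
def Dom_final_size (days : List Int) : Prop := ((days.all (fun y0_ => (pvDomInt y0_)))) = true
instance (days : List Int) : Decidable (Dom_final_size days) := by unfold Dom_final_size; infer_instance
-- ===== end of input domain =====

-- B replaces A's fused branch-accumulator loop with early return by a zero-pair guard
-- plus two independent counts combined as 1 + ones + 4*pairs (objective: simpler).

-- ===== PORT A =====
-- A's for-loop over range(len(days)) with early return, as index recursion on i.
def final_size_go (days : List Int) (i : Nat) (flower_size : Int) : Int :=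
  if _h : i < days.length then
    if decide (i + 2 ≤ days.length) && (days.getD i 0 == 0) && (days.getD (i+1) 0 == 0) then
      -1
    else if decide (2 ≤ i) && (days.getD i 0 == 1) && (days.getD (i-1) 0 == 1) then
      final_size_go days (i+1) (flower_size + 5)
    else if days.getD i 0 == 1 then
      final_size_go days (i+1) (flower_size + 1)
    else
      final_size_go days (i+1) flower_size
  else flower_size
termination_by days.length - i

def final_size (days : List Int) : Int := final_size_go days 0 1

-- ===== PORT B =====
def final_size_alt (days : List Int) : Int :=
  let n := days.length
  if (List.range (n - 1)).any
      (fun i => (days.getD i 0 == 0) && (days.getD (i+1) 0 == 0)) then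
    -1
  else
    1 + ((days.filter (fun d => d == 1)).length : Int)
      + 4 * (((List.range' 2 (n - 2)).filter
          (fun i => (days.getD i 0 == 1) && (days.getD (i-1) 0 == 1))).length : Int)

-- ===== PRECONDITION & SPEC =====
def Spec_final_size (days : List Int) (out : Int) : Prop := out = final_size_alt days
instance (days : List Int) (out : Int) : Decidable (Spec_final_size days out) := by unfold Spec_final_size; infer_instance

-- ===== CLAIM (what is proved, stated in full; the proofs are below) =====
def Claim_equal_final_size : Prop := ∀ (days : List Int), Dom_final_size days → Spec_final_size days (final_size days)

-- ===== LEMMAS AND PROOFS =====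

-- canonical form of A's loop from index i
lemma final_size_go_eq (days : List Int) (i : Nat) (s : Int) :
    final_size_go days i s =
      if (List.range' i (days.length - i)).any
          (fun j => decide (j + 2 ≤ days.length) && (days.getD j 0 == 0) && (days.getD (j+1) 0 == 0)) then
        -1
      else
        s + (((List.range' i (days.length - i)).filter (fun j => days.getD j 0 == 1)).length : Int)
          + 4 * (((List.range' i (days.length - i)).filter
              (fun j => decide (2 ≤ j) && (days.getD j 0 == 1) && (days.getD (j-1) 0 == 1))).length : Int) := by
  by_cases h : i < days.length
  · rw [final_size_go]
    have hlen : days.length - i = (days.length - (i+1)) + 1 := by omega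
    have hcons : List.range' i (days.length - i) = i :: List.range' (i+1) (days.length - (i+1)) := by
      rw [hlen, List.range'_succ]
    rw [hcons]
    simp only [dif_pos h, List.any_cons, List.filter_cons]
    by_cases hz : (decide (i + 2 ≤ days.length) && (days.getD i 0 == 0) && (days.getD (i+1) 0 == 0)) = true
    · simp only [Bool.and_eq_true, decide_eq_true_eq, beq_iff_eq,
        List.getD_eq_getElem?_getD] at hz
      simp [hz.1.1, hz.1.2, hz.2]
    · rw [if_neg hz]
      simp only [hz, Bool.false_or]
      have IH := final_size_go_eq days (i+1)
      by_cases hb : (decide (2 ≤ i) && (days.getD i 0 == 1) && (days.getD (i-1) 0 == 1)) = true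
      · have h1 : (days.getD i 0 == 1) = true := by
          simp only [Bool.and_eq_true] at hb; exact hb.1.2
        rw [if_pos hb, IH]
        by_cases ha : (List.range' (i+1) (days.length - (i+1))).any
            (fun j => decide (j + 2 ≤ days.length) && (days.getD j 0 == 0) && (days.getD (j+1) 0 == 0)) = true
        · rw [if_pos ha, if_pos ha]
        · rw [if_neg ha, if_neg ha, if_pos h1, if_pos hb]
          simp only [List.length_cons]
          push_cast
          ring
      · rw [if_neg hb]
        by_cases h1 : (days.getD i 0 == 1) = true
        · rw [if_pos h1, IH]
          by_cases ha : (List.range' (i+1) (days.length - (i+1))).any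
              (fun j => decide (j + 2 ≤ days.length) && (days.getD j 0 == 0) && (days.getD (j+1) 0 == 0)) = true
          · rw [if_pos ha, if_pos ha]
          · rw [if_neg ha, if_neg ha, if_pos h1, if_neg hb]
            simp only [List.length_cons]
            push_cast
            ring
        · rw [if_neg h1, IH]
          by_cases ha : (List.range' (i+1) (days.length - (i+1))).any
              (fun j => decide (j + 2 ≤ days.length) && (days.getD j 0 == 0) && (days.getD (j+1) 0 == 0)) = true
          · rw [if_pos ha, if_pos ha]
          · rw [if_neg ha, if_neg ha, if_neg hb, if_neg h1]
  · rw [final_size_go]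
    have : days.length - i = 0 := by omega
    simp [h, this]
termination_by days.length - i

-- A's in-loop zero-pair test over all indices equals B's over range (n-1)
lemma any_zero_pair (days : List Int) :
    (List.range' 0 days.length).any
        (fun j => decide (j + 2 ≤ days.length) && (days.getD j 0 == 0) && (days.getD (j+1) 0 == 0))
      = (List.range (days.length - 1)).any
        (fun i => (days.getD i 0 == 0) && (days.getD (i+1) 0 == 0)) := by
  rw [Bool.eq_iff_iff]
  simp only [List.any_eq_true, List.mem_range', List.mem_range, Bool.and_eq_true, decide_eq_true_eq]
  constructor
  · rintro ⟨j, ⟨hj, hlt⟩, ⟨h2, hz0⟩, hz1⟩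
    exact ⟨j, by omega, hz0, hz1⟩
  · rintro ⟨j, hj, hz0, hz1⟩
    exact ⟨j, ⟨by omega, by omega⟩, ⟨by omega, hz0⟩, hz1⟩

-- count over indices = count over elements
lemma filter_range_getD (l : List Int) (p : Int → Bool) :
    ((List.range l.length).filter (fun j => p (l.getD j 0))).length = (l.filter p).length := by
  induction l with
  | nil => simp
  | cons a t ih =>
    simp only [List.length_cons, List.range_succ_eq_map, List.filter_cons, List.filter_map,
      List.getD_cons_zero, Function.comp_def, List.getD_cons_succ, List.filter_cons]
    by_cases hp : p a = true
    · simpa [hp, List.length_map] using ih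
    · simpa [hp, List.length_map] using ih

-- A's bonus count over all indices (guarded by 2 ≤ j) = B's count over range(2, n)
lemma filter_bonus (days : List Int) :
    ((List.range' 0 days.length).filter
        (fun j => decide (2 ≤ j) && (days.getD j 0 == 1) && (days.getD (j-1) 0 == 1))).length
      = ((List.range' 2 (days.length - 2)).filter
        (fun i => (days.getD i 0 == 1) && (days.getD (i-1) 0 == 1))).length := by
  by_cases h : 2 ≤ days.length
  · have hsplit : List.range' 0 days.length = List.range' 0 2 ++ List.range' 2 (days.length - 2) := by
      have h2 : days.length = 2 + (days.length - 2) := by omega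
      rw [h2, ← List.range'_append]
      norm_num
    rw [hsplit, List.filter_append, List.length_append]
    have h0 : (List.range' 0 2).filter
        (fun j => decide (2 ≤ j) && (days.getD j 0 == 1) && (days.getD (j-1) 0 == 1)) = [] := by
      norm_num [List.range', List.filter]
    rw [h0]
    simp only [List.length_nil, Nat.zero_add]
    apply congrArg
    apply List.filter_congr
    intro j hj
    have : 2 ≤ j := (List.mem_range'_1.mp hj).1
    simp [this]
  · have h2 : days.length - 2 = 0 := by omega
    rw [h2]
    have h0 : (List.range' 0 days.length).filter
        (fun j => decide (2 ≤ j) && (days.getD j 0 == 1) && (days.getD (j-1) 0 == 1)) = [] := by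
      rw [List.filter_eq_nil_iff]
      intro j hj
      have hjr := List.mem_range'_1.mp hj
      intro hcon
      simp only [Bool.and_eq_true, decide_eq_true_eq] at hcon
      omega
    rw [h0]
    simp
  
-- ===== VERDICT (by name: the statement is the Claim_ definition above) =====
theorem final_size_spec : Claim_equal_final_size := by
  intro days _
  unfold Spec_final_size final_size final_size_alt
  rw [final_size_go_eq]
  simp only [Nat.sub_zero]
  rw [any_zero_pair, filter_bonus]
  by_cases ha : ((List.range (days.length - 1)).any
      (fun i => (days.getD i 0 == 0) && (days.getD (i+1) 0 == 0))) = true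
  · rw [if_pos ha, if_pos ha]
  · rw [if_neg ha, if_neg ha]
    have hr : List.range' 0 days.length = List.range days.length := by
      rw [List.range_eq_range']
    rw [hr, filter_range_getD days (fun d => d == 1)]
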